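-- pv_equiv track=rewrite | github.com/Elvis-codeur/Analys | Files/open.py | get_scripts
-- ===== SOURCE A (Python) =====
-- def get_scripts(text):
--     d = 0
--     f = 0
--     datas = []
--     for i in range(len(text)-8):
--         if(text[i:i+8]) == "<script>":
--             d = i
--         if(text[i:i+9]) == "</script>":
--             f = i
--             datas.append(text[d+8:f])
--
--     return datas
-- ===== SOURCE B (Python) =====
-- def get_scripts(text):
--     n = len(text)
--     opens = [i for i in range(n - 8) if text[i:i+8] == "<script>"]
--     closes = [i for i in range(n - 8) if text[i:i+9] == "</script>"]
--     out = []
--     for c in closes: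
--         d = 0
--         for o in opens:
--             if o <= c:
--                 d = o
--         out.append(text[d+8:c])
--     return out
-- ===== Notes on version B (the rewrite author's own statement) =====
-- stated objective: alternative
-- what changed: A's single stateful scan with a mutable last-open register is replaced by two index-collection passes (all '<script>' and '</script>' start positions up to len-9) followed by a per-close lookup of the most recent open position at or before it.
import Mathlib
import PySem

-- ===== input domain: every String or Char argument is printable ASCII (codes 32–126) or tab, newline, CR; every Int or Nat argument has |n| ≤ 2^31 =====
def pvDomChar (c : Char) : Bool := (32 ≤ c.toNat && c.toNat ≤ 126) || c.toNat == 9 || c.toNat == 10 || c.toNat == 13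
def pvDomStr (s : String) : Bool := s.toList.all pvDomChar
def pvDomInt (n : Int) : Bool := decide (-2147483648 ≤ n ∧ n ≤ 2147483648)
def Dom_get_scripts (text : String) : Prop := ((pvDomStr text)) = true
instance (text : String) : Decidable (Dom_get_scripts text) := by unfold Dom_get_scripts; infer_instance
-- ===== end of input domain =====

-- B replaces A's single stateful scan by two index-collection passes plus a per-close
-- lookup of the most recent '<script>' position; objective: alternative decomposition.

-- ===== PORT A =====
-- loop body of A: state (d, f, datas)
def pvStepA (text : String) (st : Int × Int × List String) (i : Int) : Int × Int × List String :=
  let d := if PySem.Str.slice text (some i) (some (i+8)) = "<script>" then i else st.1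
  if PySem.Str.slice text (some i) (some (i+9)) = "</script>" then
    (d, i, st.2.2 ++ [PySem.Str.slice text (some (d+8)) (some i)])
  else
    (d, st.2.1, st.2.2)

def get_scripts (text : String) : List String :=
  ((PySem.List.pyRange 0 (PySem.Str.len text - 8) 1).foldl (pvStepA text) (0, 0, [])).2.2

-- ===== PORT B =====
def get_scripts_alt (text : String) : List String :=
  let opens := (PySem.List.pyRange 0 (PySem.Str.len text - 8) 1).filter
    (fun i => decide (PySem.Str.slice text (some i) (some (i+8)) = "<script>"))
  let closes := (PySem.List.pyRange 0 (PySem.Str.len text - 8) 1).filter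
    (fun i => decide (PySem.Str.slice text (some i) (some (i+9)) = "</script>"))
  closes.foldl (fun out c =>
    out ++ [PySem.Str.slice text
      (some ((opens.foldl (fun d o => if o ≤ c then o else d) 0) + 8)) (some c)]) []

-- ===== PRECONDITION & SPEC =====
def Spec_get_scripts (text : String) (out : List String) : Prop := out = get_scripts_alt text
instance (text : String) (out : List String) : Decidable (Spec_get_scripts text out) := by unfold Spec_get_scripts; infer_instance

-- ===== CLAIM (what is proved, stated in full; the proofs are below) =====
def Claim_equal_get_scripts : Prop := ∀ (text : String), Dom_get_scripts text → Spec_get_scripts text (get_scripts text)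

-- ===== LEMMAS AND PROOFS =====

-- the filter over the full range restricted to positions ≤ c is the filter over range(c+1)
lemma pv_filt_split (text : String) (c m : Int) (hc0 : 0 ≤ c) (hcm : c < m) :
    (PySem.List.pyRange 0 m 1).filter
        (fun o => decide (o ≤ c) && decide (PySem.Str.slice text (some o) (some (o+8)) = "<script>"))
      = (PySem.List.pyRange 0 (c+1) 1).filter
        (fun o => decide (PySem.Str.slice text (some o) (some (o+8)) = "<script>")) := by
  rw [PySem.List.pyRange_one_append 0 (c+1) m (by omega) (by omega), List.filter_append]
  have h1 : (PySem.List.pyRange (c+1) m 1).filter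
      (fun o => decide (o ≤ c) && decide (PySem.Str.slice text (some o) (some (o+8)) = "<script>")) = [] := by
    apply List.filter_eq_nil_iff.mpr
    intro o ho
    have hmem := PySem.List.mem_pyRange_one.mp ho
    simp only [Bool.and_eq_true, decide_eq_true_eq, not_and]
    intro h; omega
  have h2 : (PySem.List.pyRange 0 (c+1) 1).filter
      (fun o => decide (o ≤ c) && decide (PySem.Str.slice text (some o) (some (o+8)) = "<script>"))
      = (PySem.List.pyRange 0 (c+1) 1).filter
      (fun o => decide (PySem.Str.slice text (some o) (some (o+8)) = "<script>")) := by
    apply List.filter_congr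
    intro o ho
    have hmem := PySem.List.mem_pyRange_one.mp ho
    have : o ≤ c := by omega
    simp [this]
  rw [h1, h2, List.append_nil]

-- A's loop, characterised: the d-register is the overwrite-fold of the open positions,
-- and each emitted piece uses the last open position at or before its close.
lemma pv_Aloop (text : String) (k : Nat) :
    (PySem.List.pyRange 0 (k : Int) 1).foldl (pvStepA text) (0, 0, [])
      = ( ((PySem.List.pyRange 0 (k:Int) 1).filter
            (fun o => decide (PySem.Str.slice text (some o) (some (o+8)) = "<script>"))).foldl (fun _ o => o) 0,
          ((PySem.List.pyRange 0 (k:Int) 1).filter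
            (fun c => decide (PySem.Str.slice text (some c) (some (c+9)) = "</script>"))).foldl (fun _ c => c) 0,
          ((PySem.List.pyRange 0 (k:Int) 1).filter
            (fun c => decide (PySem.Str.slice text (some c) (some (c+9)) = "</script>"))).map
            (fun c => PySem.Str.slice text
              (some ((((PySem.List.pyRange 0 (c+1) 1).filter
                (fun o => decide (PySem.Str.slice text (some o) (some (o+8)) = "<script>"))).foldl (fun _ o => o) 0) + 8))
              (some c)) ) := by
  induction k with
  | zero =>
    rw [show ((0:Nat):Int) = 0 by norm_num, PySem.List.pyRange_one_eq_nil (by omega)]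
    simp
  | succ k ih =>
    have hcast : (((k+1 : Nat)):Int) = (k:Int) + 1 := by push_cast; ring
    rw [hcast]
    have hsplit : PySem.List.pyRange 0 ((k:Int)+1) 1 = PySem.List.pyRange 0 (k:Int) 1 ++ [(k:Int)] :=
      PySem.List.pyRange_one_succ_right (by positivity)
    rw [hsplit, List.foldl_append, ih, List.filter_append, List.filter_append,
        List.foldl_append, List.foldl_append, List.map_append]
    -- the inner lookup for the new close c = k coincides with the updated register
    have hd : (((PySem.List.pyRange 0 ((k:Int)+1) 1).filter
        (fun o => decide (PySem.Str.slice text (some o) (some (o+8)) = "<script>"))).foldl (fun _ o => o) 0)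
        = if PySem.Str.slice text (some (k:Int)) (some ((k:Int)+8)) = "<script>" then (k:Int)
          else ((PySem.List.pyRange 0 (k:Int) 1).filter
            (fun o => decide (PySem.Str.slice text (some o) (some (o+8)) = "<script>"))).foldl (fun _ o => o) 0 := by
      rw [hsplit, List.filter_append, List.foldl_append]
      by_cases hO : PySem.Str.slice text (some (k:Int)) (some ((k:Int)+8)) = "<script>" <;> simp [hO]
    by_cases hO : PySem.Str.slice text (some (k:Int)) (some ((k:Int)+8)) = "<script>" <;>
      by_cases hC : PySem.Str.slice text (some (k:Int)) (some ((k:Int)+9)) = "</script>" <;>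
      simp [pvStepA, hO, hC, hd]

-- ===== VERDICT (by name: the statement is the Claim_ definition above) =====
theorem get_scripts_spec : Claim_equal_get_scripts := by
  intro text _
  unfold Spec_get_scripts get_scripts get_scripts_alt
  by_cases hm : PySem.Str.len text - 8 ≤ 0
  · rw [PySem.List.pyRange_one_eq_nil hm]
    simp
  · rw [not_le] at hm
    set m : Int := PySem.Str.len text - 8 with hmdef
    have hk : ((m.toNat : Nat) : Int) = m := Int.toNat_of_nonneg (le_of_lt hm)
    rw [← hk, pv_Aloop]
    rw [PySem.List.foldl_append_singleton_eq_map]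
    simp only [List.nil_append]
    apply List.map_congr_left
    intro c hc
    have hcr : c ∈ PySem.List.pyRange 0 ((m.toNat : Nat):Int) 1 := (List.mem_filter.mp hc).1
    have hmem := PySem.List.mem_pyRange_one.mp hcr
    have hfold : ((PySem.List.pyRange 0 ((m.toNat:Nat):Int) 1).filter
          (fun i => decide (PySem.Str.slice text (some i) (some (i+8)) = "<script>"))).foldl
          (fun d o => if o ≤ c then o else d) 0
        = (((PySem.List.pyRange 0 ((m.toNat:Nat):Int) 1).filter
          (fun i => decide (PySem.Str.slice text (some i) (some (i+8)) = "<script>"))).filter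
          (fun o => decide (o ≤ c))).foldl (fun _ o => o) 0 := by
      exact PySem.List.foldl_ite_eq_foldl_filter (fun o => o ≤ c) (fun _ o => o) _ 0
    rw [hfold, List.filter_filter, pv_filt_split text c _ hmem.1 hmem.2]
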